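-- pv_equiv track=rewrite | github.com/horsto/OCTRON-GUI | octron/sam2_octron/helpers/sam2_colors.py | sample_maximally_different
-- ===== SOURCE A (Python) =====
-- def sample_maximally_different(seq):
--     """
--     Given an ascending list of numbers, return a new ordering
--     where each subsequent number is chosen such that its minimum
--     absolute difference to all previously picked numbers is maximized.
--
--     I added this to choose colors that are maximally different from each other,
--     both for labels as well as for sub-label (same label, different suffix).
--
--     Example:
--         Input:  [1, 2, 3, 4, 5]
--         Possible Output: [1, 5, 2, 4, 3]
--     """
--     if not seq:
--         return []
--     # Start with the first element.
--     sample = [seq[0]]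
--     remaining = list(seq[1:])
--     while remaining:
--         # For each candidate, compute the minimum distance to any element in sample,
--         # then select the candidate with the maximum such distance.
--         candidate = max(remaining, key=lambda x: min(abs(x - s) for s in sample))
--         sample.append(candidate)
--         remaining.remove(candidate)
--     return sample
-- ===== SOURCE B (Python) =====
-- def sample_maximally_different(seq):
--     """Greedy max-min-distance ordering; O(n^2) via incrementally
--     maintained min-distances instead of recomputing min over the
--     picked set for every candidate each round."""
--     if not seq:
--         return []
--     first = seq[0]
--     result = [first]
--     # each remaining value paired with its current min distance to the picked set
--     pairs = [(x, abs(x - first)) for x in seq[1:]]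
--     while pairs:
--         best_i = 0
--         best_v, best_d = pairs[0]
--         for i in range(1, len(pairs)):
--             v, d = pairs[i]
--             if d > best_d:
--                 best_i, best_v, best_d = i, v, d
--         result.append(best_v)
--         pairs = [(v, min(d, abs(v - best_v)))
--                  for j, (v, d) in enumerate(pairs) if j != best_i]
--     return result
-- ===== Notes on version B (the rewrite author's own statement) =====
-- stated objective: faster
-- what changed: B maintains each remaining candidate's min distance to the picked set incrementally (one min-update per pick) instead of A's recomputing, every round, the min over the whole picked set for every candidate inside max(); tie-breaking and removal order are preserved exactly.
import Mathlib
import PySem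

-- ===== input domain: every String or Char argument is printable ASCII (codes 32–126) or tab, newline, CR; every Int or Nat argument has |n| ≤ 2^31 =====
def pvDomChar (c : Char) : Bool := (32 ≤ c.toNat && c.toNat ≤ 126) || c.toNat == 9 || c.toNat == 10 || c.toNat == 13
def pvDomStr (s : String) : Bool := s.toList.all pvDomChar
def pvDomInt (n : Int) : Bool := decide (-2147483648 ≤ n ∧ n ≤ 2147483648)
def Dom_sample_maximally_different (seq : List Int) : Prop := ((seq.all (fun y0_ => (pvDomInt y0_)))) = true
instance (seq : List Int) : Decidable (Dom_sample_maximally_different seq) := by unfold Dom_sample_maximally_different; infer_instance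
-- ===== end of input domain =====

-- B replaces A's per-round recomputation of every candidate's min distance to the whole
-- picked set (O(n^3)) by incrementally maintained min distances updated once per pick (O(n^2)).

-- ===== PORT A =====
-- min(abs(x - s) for s in sample); sample is nonempty throughout A's loop, so the getD 0 default is never used
def aKey (sample : List Int) (x : Int) : Int :=
  (PySem.List.min? (sample.map (fun s => |x - s|)) (fun d => d)).getD 0

-- the 'while remaining:' loop; each iteration removes exactly one element, so fuel = remaining.length is exact
def aLoop : Nat → List Int → List Int → List Int
  | 0, sample, _ => sample
  | fuel+1, sample, remaining =>
    match PySem.List.max? remaining (aKey sample) with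
    | none => sample
    | some c => aLoop fuel (sample ++ [c]) ((PySem.List.remove? remaining c).getD remaining)

def sample_maximally_different (seq : List Int) : List Int :=
  match seq with
  | [] => []
  | x :: rest => aLoop rest.length [x] rest

-- ===== PORT B =====
-- the 'for i in range(1, len(pairs))' argmax scan: state ((best_i, best_v, best_d), i)
def bSelect (p0 : Int × Int) (t : List (Int × Int)) : (Int × Int × Int) × Int :=
  t.foldl
    (fun acc p => if acc.1.2.2 < p.2 then ((acc.2, p.1, p.2), acc.2 + 1) else (acc.1, acc.2 + 1))
    ((0, p0.1, p0.2), 1)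

def bLoop : Nat → List Int → List (Int × Int) → List Int
  | 0, result, _ => result
  | fuel+1, result, pairs =>
    match pairs with
    | [] => result
    | p0 :: t =>
      let st := bSelect p0 t
      let bi := st.1.1
      let bv := st.1.2.1
      let rest := ((PySem.List.enumerate pairs).filter (fun jp => jp.1 != bi)).map
          (fun jp => (jp.2.1, min jp.2.2 |jp.2.1 - bv|))
      bLoop fuel (result ++ [bv]) rest

def sample_maximally_different_alt (seq : List Int) : List Int :=
  match seq with
  | [] => []
  | first :: rest => bLoop rest.length [first] (rest.map (fun x => (x, |x - first|)))

-- ===== PRECONDITION & SPEC =====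
def Spec_sample_maximally_different (seq : List Int) (out : List Int) : Prop := out = sample_maximally_different_alt seq
instance (seq : List Int) (out : List Int) : Decidable (Spec_sample_maximally_different seq out) := by unfold Spec_sample_maximally_different; infer_instance

-- ===== CLAIM (what is proved, stated in full; the proofs are below) =====
def Claim_equal_sample_maximally_different : Prop := ∀ (seq : List Int), Dom_sample_maximally_different seq → Spec_sample_maximally_different seq (sample_maximally_different seq)

-- ===== LEMMAS AND PROOFS =====

lemma aKey_single (x y : Int) : aKey [x] y = |y - x| := by
  simp [aKey, PySem.List.min?]

lemma aKey_cons (s : Int) (t : List Int) (x : Int) :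
    aKey (s :: t) x = (t.map (fun u => |x - u|)).foldl min |x - s| := by
  simp [aKey, PySem.List.min?_id_cons]

lemma aKey_append (s : Int) (t : List Int) (c x : Int) :
    aKey ((s :: t) ++ [c]) x = min (aKey (s :: t) x) |x - c| := by
  simp only [List.cons_append, aKey_cons, List.map_append, List.foldl_append,
    List.map_cons, List.map_nil, List.foldl_cons, List.foldl_nil]

lemma max?_cons {key : Int → Int} (x : Int) (t : List Int) :
    PySem.List.max? (x :: t) key =
      some (t.foldl (fun m y => if key m < key y then y else m) x) := by
  simp only [PySem.List.max?, List.foldl_cons]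
  induction t generalizing x with
  | nil => rfl
  | cons y u ih =>
    simp only [List.foldl_cons]
    by_cases h : key x < key y <;> simp only [if_pos, h, ite_false] <;> exact ih _

lemma eraseIdx_map (f : Int → Int × Int) (l : List Int) (i : Nat) :
    (l.map f).eraseIdx i = (l.eraseIdx i).map f := by
  induction l generalizing i with
  | nil => simp
  | cons a l ih =>
    cases i with
    | zero => simp
    | succ i => simp [ih]

lemma enum_map (h : Int × Int → Int × Int) :
    ∀ (t : List (Int × Int)) (s : Int),
      (PySem.List.enumerate t s).map (fun jp => h jp.2) = t.map h := by
  intro t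
  induction t with
  | nil => intro s; rfl
  | cons a t ih => intro s; simp [PySem.List.enumerate, ih]

lemma enum_filter_lt :
    ∀ (t : List (Int × Int)) (s targ : Int), targ < s →
      (PySem.List.enumerate t s).filter (fun jp => jp.1 != targ) = PySem.List.enumerate t s := by
  intro t
  induction t with
  | nil => intro s targ _; rfl
  | cons a t ih =>
    intro s targ hlt
    have hne : s ≠ targ := by omega
    simp [PySem.List.enumerate, hne, ih (s + 1) targ (by omega)]

lemma enum_filter_map (h : Int × Int → Int × Int) :
    ∀ (q : List (Int × Int)) (s : Int) (i : Nat), i < q.length →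
      ((PySem.List.enumerate q s).filter (fun jp => jp.1 != (s + (i : Int)))).map (fun jp => h jp.2)
        = (q.eraseIdx i).map h := by
  intro q
  induction q with
  | nil => intro s i hi; simp at hi
  | cons a q ih =>
    intro s i hi
    cases i with
    | zero =>
      simp [PySem.List.enumerate,
        enum_filter_lt q (s + 1) s (by omega), enum_map h]
    | succ i =>
      rw [show s + (((i : Nat) + 1 : Nat) : Int) = (s + 1) + (i : Int) by push_cast; ring]
      have hkeep : ((s : Int) != (s + 1) + (i : Int)) = true := by
        simp only [bne_iff_ne, ne_eq]; omega
      simp only [PySem.List.enumerate, List.filter_cons, hkeep, if_true,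
        List.map_cons, List.eraseIdx_cons_succ]
      rw [ih (s + 1) i (by simpa using hi)]

lemma stepFold (key : Int → Int) (rem : List Int) :
    ∀ (n k bi : Nat), n + k = rem.length → (hbi : bi < k) → (hk : k ≤ rem.length) →
    (∀ j, (hj : j < k) → key (rem[j]'(by omega)) ≤ key (rem[bi]'(by omega))) →
    (∀ j, (hj : j < bi) → key (rem[j]'(by omega)) < key (rem[bi]'(by omega))) →
    ∃ bi', ∃ h' : bi' < rem.length,
      ((rem.drop k).map (fun x => (x, key x))).foldl
          (fun acc p => if acc.1.2.2 < p.2 then ((acc.2, p.1, p.2), acc.2 + 1) else (acc.1, acc.2 + 1))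
          (((bi : Int), (rem[bi]'(by omega), key (rem[bi]'(by omega)))), (k : Int))
        = (((bi' : Int), (rem[bi'], key rem[bi'])), (rem.length : Int)) ∧
      (rem.drop k).foldl (fun m y => if key m < key y then y else m) (rem[bi]'(by omega)) = rem[bi'] ∧
      (∀ j, (hj : j < rem.length) → key rem[j] ≤ key rem[bi']) ∧
      (∀ j, (hj : j < bi') → key (rem[j]'(by omega)) < key rem[bi']) := by
  intro n
  induction n with
  | zero =>
    intro k bi hnk hbi hk hle hlt
    have hkl : k = rem.length := by omega
    subst hkl
    refine ⟨bi, by omega, ?_, ?_, hle, hlt⟩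
    · simp
    · simp
  | succ n ih =>
    intro k bi hnk hbi hk hle hlt
    have hklt : k < rem.length := by omega
    rw [List.drop_eq_getElem_cons hklt]
    simp only [List.map_cons, List.foldl_cons]
    by_cases hc : key (rem[bi]'(by omega)) < key (rem[k]'hklt)
    · have h1 : ∀ j, (hj : j < k + 1) → key (rem[j]'(by omega)) ≤ key (rem[k]'hklt) := by
        intro j hj
        by_cases hjk : j < k
        · exact le_of_lt (lt_of_le_of_lt (hle j hjk) hc)
        · have : j = k := by omega
          subst this; exact le_refl _
      have h2 : ∀ j, (hj : j < k) → key (rem[j]'(by omega)) < key (rem[k]'hklt) :=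
        fun j hj => lt_of_le_of_lt (hle j hj) hc
      obtain ⟨bi', h', heqB, heqA, hle', hlt'⟩ := ih (k + 1) k (by omega) (by omega) (by omega) h1 h2
      refine ⟨bi', h', ?_, ?_, hle', hlt'⟩
      · rw [if_pos hc]
        convert heqB using 3
      · rw [if_pos hc]; exact heqA
    · have h1 : ∀ j, (hj : j < k + 1) → key (rem[j]'(by omega)) ≤ key (rem[bi]'(by omega)) := by
        intro j hj
        by_cases hjk : j < k
        · exact hle j hjk
        · have : j = k := by omega
          subst this; omega
      obtain ⟨bi', h', heqB, heqA, hle', hlt'⟩ := ih (k + 1) bi (by omega) (by omega) (by omega) h1 hlt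
      refine ⟨bi', h', ?_, ?_, hle', hlt'⟩
      · rw [if_neg hc]
        convert heqB using 3
      · rw [if_neg hc]; exact heqA

lemma loop_eq : ∀ (fuel : Nat) (sample rem : List Int), sample ≠ [] →
    bLoop fuel sample (rem.map (fun x => (x, aKey sample x))) = aLoop fuel sample rem := by
  intro fuel
  induction fuel with
  | zero => intro sample rem _; rfl
  | succ fuel ih =>
    intro sample rem hs
    cases rem with
    | nil => rfl
    | cons r0 rt =>
      obtain ⟨s0, st, rfl⟩ : ∃ s0 st, sample = s0 :: st := by
        cases sample with
        | nil => exact absurd rfl hs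
        | cons a b => exact ⟨a, b, rfl⟩
      obtain ⟨bi', h', heqB, heqA, hle', hlt'⟩ :=
        stepFold (aKey (s0 :: st)) (r0 :: rt) rt.length 1 0 (by simp) (by omega) (by simp)
          (by intro j hj; interval_cases j; exact le_refl _)
          (by intro j hj; omega)
      -- A's candidate is the element B's scan selects
      have hmax : PySem.List.max? (r0 :: rt) (aKey (s0 :: st))
          = some ((r0 :: rt)[bi']'h') := by
        rw [max?_cons]
        exact congrArg some heqA
      -- A's remove of the first occurrence of that value is removal at index bi'
      have hremove : PySem.List.remove? (r0 :: rt) ((r0 :: rt)[bi']'h')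
          = some ((r0 :: rt).eraseIdx bi') := by
        have hidx : List.idxOf? ((r0 :: rt)[bi']'h') (r0 :: rt) = some bi' := by
          rw [List.idxOf?_eq_some_iff]
          exact ⟨h', rfl, fun j hj hEq =>
            absurd (congrArg (aKey (s0 :: st)) hEq) (ne_of_lt (hlt' j hj))⟩
        simp [PySem.List.remove?, hidx]
      -- one step of B
      show bLoop (fuel+1) (s0 :: st)
          ((r0, aKey (s0 :: st) r0) :: rt.map (fun x => (x, aKey (s0 :: st) x))) = _
      rw [bLoop]
      have hsel : bSelect (r0, aKey (s0 :: st) r0) (rt.map (fun x => (x, aKey (s0 :: st) x)))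
          = (((bi' : Int), ((r0 :: rt)[bi']'h', aKey (s0 :: st) ((r0 :: rt)[bi']'h'))),
             ((r0 :: rt).length : Int)) := by
        rw [bSelect]
        exact heqB
      simp only [hsel]
      -- B's rebuilt pair list carries exactly the updated min distances
      have hrest :
          (((PySem.List.enumerate
              ((r0, aKey (s0 :: st) r0) :: rt.map (fun x => (x, aKey (s0 :: st) x)))).filter
              (fun jp => jp.1 != ((bi' : Int)))).map
            (fun jp => (jp.2.1, min jp.2.2 |jp.2.1 - (r0 :: rt)[bi']|)))
          = ((r0 :: rt).eraseIdx bi').map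
              (fun x => (x, aKey ((s0 :: st) ++ [(r0 :: rt)[bi']'h']) x)) := by
        have hmapcons : (r0, aKey (s0 :: st) r0) :: rt.map (fun x => (x, aKey (s0 :: st) x))
            = (r0 :: rt).map (fun x => (x, aKey (s0 :: st) x)) := by simp
        rw [hmapcons]
        have hgen := enum_filter_map (fun p => (p.1, min p.2 |p.1 - (r0 :: rt)[bi']|))
          ((r0 :: rt).map (fun x => (x, aKey (s0 :: st) x))) 0 bi' (by simpa using h')
        simp only [zero_add] at hgen
        rw [hgen, eraseIdx_map, List.map_map]
        refine List.map_congr_left ?_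
        intro x _
        simp only [Function.comp_apply, aKey_append]
      rw [hrest]
      -- one step of A
      rw [aLoop]
      simp only [hmax, hremove, Option.getD_some]
      exact ih ((s0 :: st) ++ [(r0 :: rt)[bi']'h']) ((r0 :: rt).eraseIdx bi') (by simp)

-- ===== VERDICT (by name: the statement is the Claim_ definition above) =====
theorem sample_maximally_different_spec : Claim_equal_sample_maximally_different := by
  intro seq _
  unfold Spec_sample_maximally_different
  cases seq with
  | nil => rfl
  | cons x rest =>
    show sample_maximally_different (x :: rest) = bLoop rest.length [x] (rest.map fun y => (y, |y - x|))
    have : rest.map (fun y => (y, |y - x|)) = rest.map (fun y => (y, aKey [x] y)) := by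
      refine List.map_congr_left ?_
      intro y _
      rw [aKey_single]
    rw [this]
    exact (loop_eq rest.length [x] rest (by simp)).symm
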